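-- pv_equiv track=rewrite | github.com/ssmiler/tfhe_fbs_map | fbs_mapper/map_circuit.py | get_truth_table
-- ===== SOURCE A (Python) =====
-- def get_truth_table(blif_parser_tt):
--     ttl = blif_parser_tt[0]
--     n = len(ttl) - 1
--     assert(len(ttl) > 0)
--     tte = 0 if ttl[-1] == '1' else 1
--     truth_table = [tte] * (2 ** n)
--     for l in blif_parser_tt:
--         assert(len(ttl) == len(l))
--         k = sum(map(lambda k: int(l[k]) * 2 ** (n - k - 1), range(n)))
--         truth_table[k] = 1 - tte
--     return truth_table
-- ===== SOURCE B (Python) =====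
-- def get_truth_table(blif_parser_tt):
--     ttl = blif_parser_tt[0]
--     n = len(ttl) - 1
--     assert(len(ttl) > 0)
--     tte = 0 if ttl[-1] == '1' else 1
--     for l in blif_parser_tt:
--         assert(len(ttl) == len(l))
--
--     def build(lines, m):
--         if m == 0:
--             return [1 - tte] if lines else [tte]
--         zeros = [l[1:] for l in lines if l[0] == '0']
--         ones = [l[1:] for l in lines if l[0] != '0']
--         return build(zeros, m - 1) + build(ones, m - 1)
--
--     return build(blif_parser_tt, n)
-- ===== Notes on version B (the rewrite author's own statement) =====
-- stated objective: alternative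
-- what changed: A preallocates a 2**n table and scatter-writes 1-tte at each line's arithmetically decoded index; B never computes an index: it checks the lengths up front and then builds the table by divide-and-conquer on the prefix trie, recursively partitioning the cover lines on their first character and concatenating the two half-tables.
-- outside the precondition, e.g. on get_truth_table(['033']): A returns [1, 1, 1, 0], B returns [1, 0, 1, 1]; on get_truth_table(['090']): A raises IndexError, B returns [1, 0, 1, 1]
import Mathlib
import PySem

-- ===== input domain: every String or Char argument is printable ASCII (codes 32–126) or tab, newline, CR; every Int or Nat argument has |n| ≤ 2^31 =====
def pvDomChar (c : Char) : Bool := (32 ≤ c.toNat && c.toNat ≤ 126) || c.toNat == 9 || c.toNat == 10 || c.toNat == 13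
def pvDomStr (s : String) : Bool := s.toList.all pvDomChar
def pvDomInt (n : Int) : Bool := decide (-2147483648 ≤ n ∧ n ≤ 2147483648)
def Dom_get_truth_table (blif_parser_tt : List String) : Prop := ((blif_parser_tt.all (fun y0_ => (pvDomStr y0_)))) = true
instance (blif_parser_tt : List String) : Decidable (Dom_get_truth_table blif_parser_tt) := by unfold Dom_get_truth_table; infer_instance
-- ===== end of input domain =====

-- B replaces A's scatter-writes at arithmetically decoded indices by a divide-and-conquer over the
-- prefix trie: it recursively partitions the cover lines on their first character and concatenates
-- the two half-tables, never computing an index; objective: alternative algorithm.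

-- ===== PORT A =====
-- one step of A's inner sum: s + int(l[k]) * 2 ** (n - k - 1)   (int(l[k]) = none on non-digit → ValueError)
def pvStepA (cs : List Char) (n : Nat) (s : Option Int) (k : Int) : Option Int :=
  match s, PySem.List.pyGet? cs k with
  | some acc, some c =>
    match PySem.Int.ofChars? [c] with
    | some d => some (acc + d * 2 ^ (n - k.toNat - 1))
    | none => none
  | _, _ => none

def get_truth_table (blif_parser_tt : List String) : List Int :=
  match blif_parser_tt with
  | [] => []                                   -- blif_parser_tt[0] : IndexError
  | ttl :: _ =>
    let tl := ttl.toList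
    let n : Nat := tl.length - 1               -- n = len(ttl) - 1
    match PySem.List.pyGet? tl (-1) with       -- ttl[-1] (IndexError on empty ttl, before the assert)
    | none => []
    | some last =>
      let tte : Int := if last = '1' then 0 else 1
      -- truth_table = [tte] * (2 ** n)
      let res : Option (List Int) := blif_parser_tt.foldl (fun acc l =>
        match acc with
        | none => none
        | some table =>
          if tl.length = l.toList.length then  -- assert(len(ttl) == len(l))
            -- k = sum(map(lambda k: int(l[k]) * 2 ** (n - k - 1), range(n)))
            match (PySem.List.pyRange 0 (n : Int) 1).foldl (pvStepA l.toList n) (some 0) with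
            | some k => PySem.List.pySet? table k (1 - tte)   -- truth_table[k] = 1 - tte (IndexError = none)
            | none => none
          else none) (some (List.replicate (2 ^ n) tte))
      res.getD []

-- ===== PORT B =====
-- B's recursive trie builder: partition on the first character, recurse, concatenate
def pvBuild (tte : Int) : Nat → List (List Char) → List Int
  | 0, lines => if lines.isEmpty then [tte] else [1 - tte]
  | m + 1, lines =>
    -- zeros = [l[1:] for l in lines if l[0] == '0'];  ones = [l[1:] for l in lines if l[0] != '0']
    let zeros := (lines.filter (fun l => PySem.List.pyGet? l 0 == some '0')).map
      (fun l => PySem.List.slice l (some 1) none)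
    let ones := (lines.filter (fun l => !(PySem.List.pyGet? l 0 == some '0'))).map
      (fun l => PySem.List.slice l (some 1) none)
    pvBuild tte m zeros ++ pvBuild tte m ones

def get_truth_table_alt (blif_parser_tt : List String) : List Int :=
  match blif_parser_tt with
  | [] => []                                   -- blif_parser_tt[0] : IndexError
  | ttl :: _ =>
    let tl := ttl.toList
    let n : Nat := tl.length - 1
    match PySem.List.pyGet? tl (-1) with       -- ttl[-1]
    | none => []
    | some last =>
      let tte : Int := if last = '1' then 0 else 1
      -- for l in blif_parser_tt: assert(len(ttl) == len(l))
      if blif_parser_tt.all (fun l => tl.length == l.toList.length) then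
        pvBuild tte n (blif_parser_tt.map String.toList)
      else []

-- ===== PRECONDITION & SPEC =====
-- Pre_ admits a non-empty cover whose lines all have the (positive) length of the first line and whose
-- first n = len-1 characters are all '0'/'1'. It excludes: the empty list and length mismatches (A's
-- IndexError / AssertionError), non-digit characters in the first n positions (A's ValueError), and
-- lines containing digits 2–9 there — on those A either raises IndexError (index out of range) or
-- returns a table indexed by the decimal-weighted sum, a corner outside BLIF's {0,1} cover alphabet
-- where B's binary reading is as defensible as A's.
def Pre_get_truth_table (blif_parser_tt : List String) : Prop :=
  blif_parser_tt ≠ [] ∧ 0 < blif_parser_tt.headI.toList.length ∧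
  ∀ l ∈ blif_parser_tt, l.toList.length = blif_parser_tt.headI.toList.length ∧
    ((l.toList.take (blif_parser_tt.headI.toList.length - 1)).all
      (fun c => c == '0' || c == '1')) = true
instance (blif_parser_tt : List String) : Decidable (Pre_get_truth_table blif_parser_tt) := by
  unfold Pre_get_truth_table; infer_instance

def pvWitness_get_truth_table : List String := ["11", "01"]

def Spec_get_truth_table (blif_parser_tt : List String) (out : List Int) : Prop := out = get_truth_table_alt blif_parser_tt
instance (blif_parser_tt : List String) (out : List Int) : Decidable (Spec_get_truth_table blif_parser_tt out) := by unfold Spec_get_truth_table; infer_instance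

-- ===== CLAIM (what is proved, stated in full; the proofs are below) =====
def Claim_equal_get_truth_table : Prop := ∀ (blif_parser_tt : List String), Dom_get_truth_table blif_parser_tt → Pre_get_truth_table blif_parser_tt → Spec_get_truth_table blif_parser_tt (get_truth_table blif_parser_tt)

-- ===== LEMMAS AND PROOFS =====

-- B's Horner reading of a 0/1 prefix — the arithmetic yardstick both ports are measured against
def pvHorner (cs : List Char) : Int :=
  cs.foldl (fun idx c => 2 * idx + (if c = '1' then 1 else 0)) 0

-- Horner with an arbitrary accumulator splits off the accumulator
theorem pvHorner_acc (cs : List Char) (a : Int) :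
    cs.foldl (fun idx c => 2 * idx + (if c = '1' then 1 else 0)) a
      = a * 2 ^ cs.length + pvHorner cs := by
  induction cs generalizing a with
  | nil => simp [pvHorner]
  | cons c cs ih =>
    simp only [List.foldl_cons, pvHorner, List.length_cons] at *
    rw [ih, ih (2 * 0 + if c = '1' then 1 else 0)]
    ring

theorem pvHorner_cons (c : Char) (cs : List Char) :
    pvHorner (c :: cs) = (if c = '1' then 1 else 0) * 2 ^ cs.length + pvHorner cs := by
  have := pvHorner_acc cs (2 * 0 + if c = '1' then 1 else 0)
  simpa [pvHorner] using this

-- bounds of the Horner value on a 0/1 string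
theorem pvHorner_bounds (cs : List Char) (h : ∀ c ∈ cs, c = '0' ∨ c = '1') :
    0 ≤ pvHorner cs ∧ pvHorner cs < 2 ^ cs.length := by
  induction cs with
  | nil => simp [pvHorner]
  | cons c cs ih =>
    have hb := h c (List.mem_cons_self)
    have ihb := ih (fun x hx => h x (List.mem_cons_of_mem _ hx))
    have hp : (0:Int) < 2 ^ cs.length := by positivity
    have hacc : pvHorner (c :: cs)
        = (2 * 0 + if c = '1' then 1 else 0) * 2 ^ cs.length + pvHorner cs := by
      simpa [pvHorner] using pvHorner_acc cs (2 * 0 + if c = '1' then 1 else 0)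
    rw [hacc]
    rcases hb with hb | hb <;> subst hb <;> simp [List.length_cons, pow_succ] <;>
      constructor <;> nlinarith [ihb.1, ihb.2]

-- A's weighted sum from position j onward, with accumulator a
theorem pvSumA_aux (cs : List Char) (n : Nat) (hn : n ≤ cs.length)
    (hb : ∀ c ∈ cs.take n, c = '0' ∨ c = '1') :
    ∀ (m j : Nat), j + m = n → ∀ a : Int,
      (PySem.List.pyRange (j : Int) (n : Int) 1).foldl (pvStepA cs n) (some a)
        = some (a + pvHorner ((cs.take n).drop j)) := by
  intro m
  induction m with
  | zero =>
    intro j hj a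
    have hjn : j = n := by omega
    subst hjn
    rw [PySem.List.pyRange_one_eq_nil le_rfl]
    rw [List.drop_eq_nil_of_le (by rw [List.length_take]; omega)]
    simp [pvHorner]
  | succ m ih =>
    intro j hj a
    have hjn : j < n := by omega
    have hjlen : j < cs.length := lt_of_lt_of_le hjn hn
    have hjtake : j < (cs.take n).length := by rw [List.length_take]; omega
    rw [PySem.List.pyRange_one_cons (by exact_mod_cast hjn)]
    simp only [List.foldl_cons]
    have hget : PySem.List.pyGet? cs (j : Int) = some cs[j] := by
      rw [PySem.List.pyGet?_natCast, List.getElem?_eq_getElem hjlen]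
    have hcj : cs[j] = '0' ∨ cs[j] = '1' := by
      have htk : (cs.take n)[j] = cs[j] := List.getElem_take
      exact htk ▸ hb _ (List.getElem_mem hjtake)
    have hstep : pvStepA cs n (some a) (j : Int)
        = some (a + (if cs[j] = '1' then 1 else 0) * 2 ^ (n - j - 1)) := by
      have hz : PySem.Int.ofChars? ['0'] = some 0 := by decide
      have ho : PySem.Int.ofChars? ['1'] = some 1 := by decide
      rcases hcj with h | h <;> simp [pvStepA, hget, h, hz, ho]
    rw [hstep]
    rw [show ((j : Int) + 1) = ((j + 1 : Nat) : Int) by push_cast; ring]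
    rw [ih (j + 1) (by omega)]
    congr 1
    have hdrop : (cs.take n).drop j = cs[j] :: (cs.take n).drop (j + 1) := by
      rw [List.drop_eq_getElem_cons hjtake, List.getElem_take]
    rw [hdrop]
    have hlen2 : ((cs.take n).drop (j + 1)).length = n - j - 1 := by
      rw [List.length_drop, List.length_take]; omega
    have hacc := pvHorner_acc ((cs.take n).drop (j + 1))
      (2 * 0 + if cs[j] = '1' then 1 else 0)
    rw [hlen2] at hacc
    simp only [pvHorner] at hacc
    simp only [pvHorner, List.foldl_cons]
    rw [hacc]
    ring

-- A's weighted sum over range(n) equals the Horner value of the first n characters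
theorem pvSumA_eq_horner (cs : List Char) (n : Nat) (hn : n ≤ cs.length)
    (hb : ∀ c ∈ cs.take n, c = '0' ∨ c = '1') :
    (PySem.List.pyRange 0 (n : Int) 1).foldl (pvStepA cs n) (some 0)
      = some (pvHorner (cs.take n)) := by
  have := pvSumA_aux cs n hn hb n 0 (by omega) 0
  simpa using this

-- the gather view of the table determined by a set s
def pvTbl (N : Nat) (tte : Int) (s : PySem.Set Int) : List Int :=
  (PySem.List.pyRange 0 (N : Int) 1).map
    (fun i => if PySem.Set.contains s i then 1 - tte else tte)

theorem pvTbl_length (N : Nat) (tte : Int) (s : PySem.Set Int) : (pvTbl N tte s).length = N := by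
  simp [pvTbl, PySem.List.length_pyRange_one]

theorem pvTbl_getElem (N : Nat) (tte : Int) (s : PySem.Set Int) (i : Nat)
    (h : i < (pvTbl N tte s).length) :
    (pvTbl N tte s)[i] = if PySem.Set.contains s (i : Int) then 1 - tte else tte := by
  simp only [pvTbl] at h ⊢
  rw [List.getElem_map, PySem.List.getElem_pyRange_one]
  simp

theorem pvTbl_empty (N : Nat) (tte : Int) : pvTbl N tte PySem.Set.empty = List.replicate N tte := by
  have : ∀ i : Int, PySem.Set.contains (PySem.Set.empty (α := Int)) i = false := by
    intro i; rfl
  simp only [pvTbl, this, if_neg Bool.false_ne_true]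
  rw [List.map_const']
  simp [PySem.List.length_pyRange_one]

-- scatter-write = gather after adding the index to the set
theorem pvTbl_set (N : Nat) (tte : Int) (s : PySem.Set Int) (k : Nat) :
    (pvTbl N tte s).set k (1 - tte) = pvTbl N tte (PySem.Set.add s (k : Int)) := by
  apply List.ext_getElem
  · simp [pvTbl_length]
  · intro i h1 h2
    rw [List.getElem_set, pvTbl_getElem, pvTbl_getElem]
    by_cases hik : k = i
    · subst hik
      simp [PySem.Set.mem_add]
    · have hik' : ¬ i = k := fun hc => hik hc.symm
      simp [hik, hik', PySem.Set.mem_add]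

-- A's loop invariant over the remaining lines
theorem pvLoop (tl : List Char) (n : Nat) (hn : n = tl.length - 1) (tte : Int)
    (ls : List String)
    (hls : ∀ l ∈ ls, l.toList.length = tl.length ∧ ∀ c ∈ l.toList.take n, c = '0' ∨ c = '1')
    (s : PySem.Set Int) :
    ls.foldl (fun acc l =>
        match acc with
        | none => none
        | some table =>
          if tl.length = l.toList.length then
            match (PySem.List.pyRange 0 (n : Int) 1).foldl (pvStepA l.toList n) (some 0) with
            | some k => PySem.List.pySet? table k (1 - tte)
            | none => none
          else none) (some (pvTbl (2 ^ n) tte s))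
      = some (pvTbl (2 ^ n) tte
          (ls.foldl (fun s l => PySem.Set.add s (pvHorner (l.toList.take n))) s)) := by
  induction ls generalizing s with
  | nil => simp
  | cons l ls ih =>
    obtain ⟨hlen, hbits⟩ := hls l List.mem_cons_self
    have hn' : n ≤ l.toList.length := by rw [hlen]; omega
    have hsum := pvSumA_eq_horner l.toList n hn' hbits
    have hlen_take : (l.toList.take n).length = n := by
      rw [List.length_take]; omega
    have hbnd := pvHorner_bounds _ hbits
    rw [hlen_take] at hbnd
    have h0 : 0 ≤ pvHorner (l.toList.take n) := hbnd.1
    have hkN : (pvHorner (l.toList.take n)).toNat < 2 ^ n := by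
      have h2 : pvHorner (l.toList.take n) < ((2 ^ n : Nat) : Int) := by
        exact_mod_cast hbnd.2
      omega
    have hset : PySem.List.pySet? (pvTbl (2 ^ n) tte s) (pvHorner (l.toList.take n)) (1 - tte)
        = some (pvTbl (2 ^ n) tte (s.add (pvHorner (l.toList.take n)))) := by
      rw [show pvHorner (l.toList.take n)
          = (((pvHorner (l.toList.take n)).toNat : Nat) : Int) from
          (Int.toNat_of_nonneg h0).symm]
      rw [PySem.List.pySet?_natCast _ _ _ (by rw [pvTbl_length]; exact hkN)]
      rw [pvTbl_set, Int.toNat_of_nonneg h0]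
    simp only [List.foldl_cons, hlen, if_true, hsum, hset]
    exact ih (fun x hx => hls x (List.mem_cons_of_mem _ hx)) _

-- ---- B-side lemmas ----

theorem pvBuild_length (tte : Int) (m : Nat) (lines : List (List Char)) :
    (pvBuild tte m lines).length = 2 ^ m := by
  induction m generalizing lines with
  | zero => by_cases h : lines.isEmpty <;> simp [pvBuild, h]
  | succ m ih => simp only [pvBuild, List.length_append, ih]; ring

-- B's recursion computes, at each position, membership of the position among the Horner values
theorem pvBuild_getElem (tte : Int) (m : Nat) (lines : List (List Char))
    (hl : ∀ l ∈ lines, m ≤ l.length ∧ ∀ c ∈ l.take m, c = '0' ∨ c = '1')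
    (i : Nat) (hi : i < 2 ^ m) (h : i < (pvBuild tte m lines).length) :
    (pvBuild tte m lines)[i]
      = if ∃ l ∈ lines, pvHorner (l.take m) = (i : Int) then 1 - tte else tte := by
  induction m generalizing lines i with
  | zero =>
    have hi0 : i = 0 := by omega
    subst hi0
    cases lines with
    | nil => simp [pvBuild]
    | cons a as =>
      have hex : ∃ l ∈ a :: as, pvHorner (l.take 0) = ((0 : Nat) : Int) :=
        ⟨a, List.mem_cons_self, by simp [pvHorner]⟩
      simp only [pvBuild, List.isEmpty_cons, Bool.false_eq_true, if_false, if_pos hex]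
      rfl
  | succ m ih =>
    -- every line is nonempty; decompose
    have hne : ∀ l ∈ lines, l ≠ [] := by
      intro l hmem hnil
      have := (hl l hmem).1
      rw [hnil] at this; simp at this
    -- zeros/ones and their hypotheses
    have hsub : ∀ l ∈ lines, m ≤ l.tail.length ∧ ∀ c ∈ l.tail.take m, c = '0' ∨ c = '1' := by
      intro l hmem
      obtain ⟨hlen, hb⟩ := hl l hmem
      cases l with
      | nil => simp at hlen
      | cons c cs =>
        refine ⟨by simpa using Nat.le_of_succ_le_succ hlen, ?_⟩
        intro x hx
        exact hb x (by simp [List.take_succ_cons]; exact Or.inr hx)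
    -- head of each line is 0/1
    have hhead : ∀ c cs, (c :: cs) ∈ lines → c = '0' ∨ c = '1' := by
      intro c cs hmem
      exact (hl _ hmem).2 c (by simp [List.take_succ_cons])
    have hget0 : ∀ (c : Char) (cs : List Char),
        PySem.List.pyGet? (c :: cs) (0 : Int) = some c := by
      intro c cs
      simp
    have hslice : ∀ (l : List Char), PySem.List.slice l (some 1) none = l.tail :=
      fun l => PySem.List.slice_from_one l
    -- the split value of the Horner reading of a nonempty line
    have hsplit : ∀ c cs, (c :: cs) ∈ lines →
        pvHorner ((c :: cs).take (m + 1))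
          = (if c = '1' then 1 else 0) * 2 ^ m + pvHorner (cs.take m) := by
      intro c cs hmem
      have hlen : m ≤ cs.length := by
        have := (hl _ hmem).1; simpa using Nat.le_of_succ_le_succ this
      rw [List.take_succ_cons, pvHorner_cons, List.length_take, Nat.min_eq_left hlen]
    have hbndtail : ∀ c cs, (c :: cs) ∈ lines →
        0 ≤ pvHorner (cs.take m) ∧ pvHorner (cs.take m) < 2 ^ m := by
      intro c cs hmem
      have hlen : m ≤ cs.length := by
        have := (hl _ hmem).1; simpa using Nat.le_of_succ_le_succ this
      have hb : ∀ x ∈ cs.take m, x = '0' ∨ x = '1' := by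
        intro x hx
        exact (hl _ hmem).2 x (by simp [List.take_succ_cons]; exact Or.inr hx)
      have := pvHorner_bounds (cs.take m) hb
      rwa [List.length_take, Nat.min_eq_left hlen] at this
    have h2m : ((2 ^ m : Nat) : Int) = (2 : Int) ^ m := by push_cast; ring
    simp only [pvBuild] at h ⊢
    by_cases hiz : i < 2 ^ m
    · rw [List.getElem_append_left (by rw [pvBuild_length]; exact hiz)]
      rw [ih _ (fun r hr => by
        obtain ⟨l, hlf, hleq⟩ := List.mem_map.mp hr
        have hlm := List.mem_filter.mp hlf
        rw [← hleq, hslice]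
        exact hsub l hlm.1) i hiz (by rw [pvBuild_length]; exact hiz)]
      congr 1
      apply propext
      constructor
      · rintro ⟨r, hr, hv⟩
        obtain ⟨l, hlf, hleq⟩ := List.mem_map.mp hr
        have hlm := List.mem_filter.mp hlf
        cases l with
        | nil => exact absurd rfl (hne _ hlm.1)
        | cons c cs =>
          have hc0 : c = '0' := by
            have := hlm.2
            rw [hget0] at this
            simpa using this
          refine ⟨c :: cs, hlm.1, ?_⟩
          rw [hsplit c cs hlm.1, hc0]
          rw [← hleq, hslice] at hv
          simpa using hv
      · rintro ⟨l, hmem, hv⟩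
        cases l with
        | nil => exact absurd rfl (hne _ hmem)
        | cons c cs =>
          have hc0 : c = '0' := by
            rcases hhead c cs hmem with h | h
            · exact h
            · exfalso
              rw [hsplit c cs hmem, h] at hv
              have := (hbndtail c cs hmem).1
              have hiI : ((i : Nat) : Int) < ((2 ^ m : Nat) : Int) := by exact_mod_cast hiz
              rw [h2m] at hiI
              simp at hv
              omega
          refine ⟨cs, List.mem_map.mpr ⟨c :: cs, List.mem_filter.mpr
            ⟨hmem, by rw [hget0, hc0]; rfl⟩, by rw [hslice]; rfl⟩, ?_⟩
          rw [hsplit c cs hmem, hc0] at hv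
          simpa using hv
    · have hi2 : i - 2 ^ m < 2 ^ m := by
        have : 2 ^ (m + 1) = 2 ^ m + 2 ^ m := by rw [pow_succ]; omega
        omega
      rw [List.getElem_append_right (by rw [pvBuild_length]; omega)]
      rw [ih _ (fun r hr => by
        obtain ⟨l, hlf, hleq⟩ := List.mem_map.mp hr
        have hlm := List.mem_filter.mp hlf
        rw [← hleq, hslice]
        exact hsub l hlm.1) _ (by rw [pvBuild_length]; exact hi2)
        (by rw [pvBuild_length, pvBuild_length]; exact hi2)]
      rw [pvBuild_length]
      congr 1
      apply propext
      have hiI : ((i - 2 ^ m : Nat) : Int) = (i : Int) - 2 ^ m := by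
        have : 2 ^ m ≤ i := by omega
        push_cast [this]; ring
      constructor
      · rintro ⟨r, hr, hv⟩
        obtain ⟨l, hlf, hleq⟩ := List.mem_map.mp hr
        have hlm := List.mem_filter.mp hlf
        cases l with
        | nil => exact absurd rfl (hne _ hlm.1)
        | cons c cs =>
          have hc1 : c = '1' := by
            rcases hhead c cs hlm.1 with h | h
            · exfalso
              have := hlm.2
              rw [hget0, h] at this
              simp at this
            · exact h
          refine ⟨c :: cs, hlm.1, ?_⟩
          rw [hsplit c cs hlm.1, hc1]
          rw [← hleq, hslice] at hv
          rw [hiI] at hv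
          simp at hv ⊢
          omega
      · rintro ⟨l, hmem, hv⟩
        cases l with
        | nil => exact absurd rfl (hne _ hmem)
        | cons c cs =>
          have hc1 : c = '1' := by
            rcases hhead c cs hmem with h | h
            · exfalso
              rw [hsplit c cs hmem, h] at hv
              have hb := (hbndtail c cs hmem).2
              have hiI' : ((2 ^ m : Nat) : Int) ≤ (i : Int) := by exact_mod_cast (by omega : 2 ^ m ≤ i)
              rw [h2m] at hiI'
              simp at hv
              omega
            · exact h
          refine ⟨cs, List.mem_map.mpr ⟨c :: cs, List.mem_filter.mpr
            ⟨hmem, by rw [hget0, hc1]; rfl⟩, by rw [hslice]; rfl⟩, ?_⟩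
          rw [hsplit c cs hmem, hc1] at hv
          rw [hiI]
          simp at hv ⊢
          omega

-- ===== VERDICT (by name: the statement is the Claim_ definition above) =====
theorem get_truth_table_spec : Claim_equal_get_truth_table := by
  intro bt _hdom hpre
  obtain ⟨hne, hpos, hall⟩ := hpre
  unfold Spec_get_truth_table
  cases bt with
  | nil => exact absurd rfl hne
  | cons ttl rest =>
    simp only [List.headI] at hpos hall
    have htne : ttl.toList ≠ [] := by
      intro h; rw [h] at hpos; simp at hpos
    obtain ⟨c, hc⟩ := Option.isSome_iff_exists.mp (List.getLast?_isSome.mpr htne)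
    simp only [get_truth_table, get_truth_table_alt, PySem.List.pyGet?_neg_one, hc]
    set n := ttl.toList.length - 1 with hn
    set tte : Int := if c = '1' then 0 else 1 with htte
    have hls : ∀ l ∈ ttl :: rest, l.toList.length = ttl.toList.length ∧
        ∀ ch ∈ l.toList.take n, ch = '0' ∨ ch = '1' := by
      intro l hl
      obtain ⟨h1, h2⟩ := hall l hl
      exact ⟨h1, fun ch hch => by simpa using (List.all_eq_true.mp h2) ch hch⟩
    have hallb : (ttl :: rest).all (fun l => ttl.toList.length == l.toList.length) = true := by
      rw [List.all_eq_true]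
      intro l hl
      simpa using ((hls l hl).1).symm
    rw [hallb]
    simp only [if_true]
    rw [← pvTbl_empty (2 ^ n) tte]
    rw [pvLoop ttl.toList n rfl tte (ttl :: rest) hls PySem.Set.empty]
    simp only [Option.getD_some]
    -- both sides elementwise
    apply List.ext_getElem
    · rw [pvTbl_length, pvBuild_length]
    · intro i h1 h2
      have hiN : i < 2 ^ n := by rwa [pvTbl_length] at h1
      rw [pvTbl_getElem, pvBuild_getElem tte n ((ttl :: rest).map String.toList)
        (fun l hl => by
          obtain ⟨s, hs, hseq⟩ := List.mem_map.mp hl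
          obtain ⟨hlen, hb⟩ := hls s hs
          rw [← hseq]
          exact ⟨by rw [hlen]; omega, hb⟩) i hiN h2]
      congr 1
      apply propext
      rw [show PySem.Set.contains
            ((ttl :: rest).foldl (fun s l => PySem.Set.add s (pvHorner (l.toList.take n)))
              PySem.Set.empty) (i : Int) = true
          ↔ (i : Int) ∈ (ttl :: rest).foldl
              (fun s l => PySem.Set.add s (pvHorner (l.toList.take n))) PySem.Set.empty from
        PySem.Set.contains_iff _ _]
      rw [PySem.Set.mem_foldl_add]
      constructor
      · rintro (h | ⟨l, hl, hv⟩)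
        · exact absurd h (by simp [PySem.Set.empty])
        · exact ⟨l.toList, List.mem_map.mpr ⟨l, hl, rfl⟩, hv.symm⟩
      · rintro ⟨r, hr, hv⟩
        obtain ⟨l, hl, hleq⟩ := List.mem_map.mp hr
        exact Or.inr ⟨l, hl, by rw [← hleq] at hv; exact hv.symm⟩
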